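/- GENERATED by farm/worked/mk_tree_copies.py from farm/worked/two_to/Proof.lean (a worked proof of the farm's unit `two_to`,
   accepted by the verdict) — do not edit. -/
import Vorbis.Spec.Units.two_to

open X86 X86.User Asan Vorbis

set_option maxRecDepth 4000
set_option maxHeartbeats 4000000

/-- `two_to` satisfies its contract: four instructions, no memory access. -/
theorem Vorbis.Spec.Worked.two_to_ok : Vorbis.Spec.two_to.Statement := by
  intro Lay hLay μ hμ u₀ hcode others frames u ret he hpre
  v_entry he
  u_walk hcode [hμ.vendor] span [Vorbis.L.textLo, Vorbis.L.textHi] side (v_side)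
  refine ReachVia.done ?_
  v_returned
  show ShadowUntouched u.mem _
  v_untouched
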